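-- pv_equiv track=rewrite | github.com/moink/advent2022 | day15/day15.py | any_part_of_zone_unseen_by_beacon
-- ===== SOURCE A (Python) =====
-- def manhattan_distance(pt1, pt2):
--     (x_s, y_s) = pt1
--     (x_b, y_b) = pt2
--     dist = abs(x_b - x_s) + abs(y_b - y_s)
--     return dist
--
-- def any_part_of_zone_unseen_by_beacon(zone, sensor, beacon):
--     dist = manhattan_distance(sensor, beacon)
--     min_x, max_x, min_y, max_y = zone
--     corners = [(min_x, min_y), (min_x, max_y), (max_x, min_y), (max_x, max_y)]
--     max_dist = max(
--         manhattan_distance(corner, sensor) for corner in corners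
--     )
--     return max_dist > dist
-- ===== SOURCE B (Python) =====
-- def any_part_of_zone_unseen_by_beacon(zone, sensor, beacon):
--     (x_s, y_s) = sensor
--     (x_b, y_b) = beacon
--     dist = abs(x_b - x_s) + abs(y_b - y_s)
--     min_x, max_x, min_y, max_y = zone
--     dx = max(abs(x_s - min_x), abs(x_s - max_x))
--     dy = max(abs(y_s - min_y), abs(y_s - max_y))
--     return dx + dy > dist
-- ===== Notes on version B (the rewrite author's own statement) =====
-- stated objective: simpler
-- what changed: B drops the corners list and the max-over-generator: Manhattan distance separates per axis, so the farthest-corner distance is computed as a closed-form dx+dy with dx, dy the per-axis maxima.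
import Mathlib
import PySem

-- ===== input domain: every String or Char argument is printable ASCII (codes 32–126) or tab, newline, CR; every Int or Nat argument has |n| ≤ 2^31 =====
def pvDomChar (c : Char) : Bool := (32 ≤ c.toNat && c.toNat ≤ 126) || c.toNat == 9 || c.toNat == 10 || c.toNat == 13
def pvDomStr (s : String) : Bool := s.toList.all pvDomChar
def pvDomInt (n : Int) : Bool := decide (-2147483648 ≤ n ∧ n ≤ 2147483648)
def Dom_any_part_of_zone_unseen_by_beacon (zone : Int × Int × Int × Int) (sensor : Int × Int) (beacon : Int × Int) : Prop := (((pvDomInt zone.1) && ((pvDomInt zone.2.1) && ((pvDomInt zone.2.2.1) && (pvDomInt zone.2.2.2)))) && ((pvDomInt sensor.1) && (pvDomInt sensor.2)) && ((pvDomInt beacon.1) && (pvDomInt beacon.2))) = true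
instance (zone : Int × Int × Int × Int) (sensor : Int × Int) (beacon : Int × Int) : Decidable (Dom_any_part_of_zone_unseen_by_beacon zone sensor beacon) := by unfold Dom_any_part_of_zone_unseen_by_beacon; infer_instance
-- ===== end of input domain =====

-- B replaces the four-corner enumeration and max-over-generator by a closed-form per-axis formula (simpler).


-- ===== PORT A =====
def manhattan_distance (pt1 pt2 : Int × Int) : Int :=
  let (x_s, y_s) := pt1
  let (x_b, y_b) := pt2
  |x_b - x_s| + |y_b - y_s|

def any_part_of_zone_unseen_by_beacon (zone : Int × Int × Int × Int) (sensor : Int × Int) (beacon : Int × Int) : Bool :=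
  let dist := manhattan_distance sensor beacon
  let (min_x, max_x, min_y, max_y) := zone
  let corners : List (Int × Int) := [(min_x, min_y), (min_x, max_y), (max_x, min_y), (max_x, max_y)]
  -- Python's max over the nonempty generator; corners is nonempty so getD's default is never used
  let max_dist := (PySem.List.max? (corners.map (fun corner => manhattan_distance corner sensor)) (fun d => d)).getD 0
  decide (max_dist > dist)

-- ===== PORT B =====
def any_part_of_zone_unseen_by_beacon_alt (zone : Int × Int × Int × Int) (sensor : Int × Int) (beacon : Int × Int) : Bool :=
  let (x_s, y_s) := sensor
  let (x_b, y_b) := beacon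
  let dist := |x_b - x_s| + |y_b - y_s|
  let (min_x, max_x, min_y, max_y) := zone
  let dx := max |x_s - min_x| |x_s - max_x|
  let dy := max |y_s - min_y| |y_s - max_y|
  decide (dx + dy > dist)

-- ===== PRECONDITION & SPEC =====
def Spec_any_part_of_zone_unseen_by_beacon (zone : Int × Int × Int × Int) (sensor : Int × Int) (beacon : Int × Int) (out : Bool) : Prop := out = any_part_of_zone_unseen_by_beacon_alt zone sensor beacon
instance (zone : Int × Int × Int × Int) (sensor : Int × Int) (beacon : Int × Int) (out : Bool) : Decidable (Spec_any_part_of_zone_unseen_by_beacon zone sensor beacon out) := by unfold Spec_any_part_of_zone_unseen_by_beacon; infer_instance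

-- ===== CLAIM (what is proved, stated in full; the proofs are below) =====
def Claim_equal_any_part_of_zone_unseen_by_beacon : Prop := ∀ (zone : Int × Int × Int × Int) (sensor : Int × Int) (beacon : Int × Int), Dom_any_part_of_zone_unseen_by_beacon zone sensor beacon → Spec_any_part_of_zone_unseen_by_beacon zone sensor beacon (any_part_of_zone_unseen_by_beacon zone sensor beacon)

-- ===== LEMMAS AND PROOFS =====

-- ===== VERDICT (by name: the statement is the Claim_ definition above) =====
theorem any_part_of_zone_unseen_by_beacon_spec : Claim_equal_any_part_of_zone_unseen_by_beacon := by
  intro ⟨mnx, mxx, mny, mxy⟩ ⟨xs, ys⟩ ⟨xb, yb⟩ _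
  unfold Spec_any_part_of_zone_unseen_by_beacon
  simp only [any_part_of_zone_unseen_by_beacon, any_part_of_zone_unseen_by_beacon_alt,
    manhattan_distance, List.map, PySem.List.max?_id_cons, List.foldl, Option.getD,
    decide_eq_decide]
  have key : ∀ a b c d : Int, max (max (max (a + c) (a + d)) (b + c)) (b + d) = max a b + max c d := by
    intro a b c d
    simp only [max_def]
    split_ifs <;> omega
  rw [key]
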